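-- pv_equiv track=rewrite | github.com/Gonnnnn/Algorithm | Baekjoon/Dynamic_Programming/9095_123더하기.py | calc
-- ===== SOURCE A (Python) =====
-- def calc(n, table):
--   if(n <= 2):
--     return n
--   elif(n == 3):
--     return 4
--   if(table[n] == 0):
--     table[n] = calc(n-1, table) + calc(n-2, table) + calc(n-3, table)
--     return table[n]
--   return table[n]
-- ===== SOURCE B (Python) =====
-- def calc(n, table):
--   if n <= 2:
--     return n
--   if n == 3:
--     return 4
--   if table[n] != 0:
--     return table[n]
--   def v(j):
--     if j <= 2:
--       return j
--     if j == 3: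
--       return 4
--     return table[j]
--   for i in range(4, n + 1):
--     if table[i] == 0:
--       table[i] = v(i - 1) + v(i - 2) + v(i - 3)
--   return table[n]
-- ===== Notes on version B (the rewrite author's own statement) =====
-- stated objective: alternative
-- what changed: Replaces A's memoized recursion (top-down, state-threaded through three recursive calls) by a bottom-up iterative loop that fills the table from index 4 up to n.
import Mathlib
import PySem

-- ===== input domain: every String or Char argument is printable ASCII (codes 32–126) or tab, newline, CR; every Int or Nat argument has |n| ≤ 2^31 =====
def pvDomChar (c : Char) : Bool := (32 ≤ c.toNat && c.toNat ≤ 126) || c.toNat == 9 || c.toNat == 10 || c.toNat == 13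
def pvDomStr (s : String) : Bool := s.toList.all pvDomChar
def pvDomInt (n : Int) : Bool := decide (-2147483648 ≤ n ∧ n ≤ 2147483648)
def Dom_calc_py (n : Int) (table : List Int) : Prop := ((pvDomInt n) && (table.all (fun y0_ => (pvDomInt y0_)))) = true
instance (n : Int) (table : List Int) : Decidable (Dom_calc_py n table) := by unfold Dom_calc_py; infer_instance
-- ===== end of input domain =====

-- B replaces A's memoized recursion with a bottom-up loop filling the table from 4 to n
-- (equivalence is about the RETURN value; both mutate `table`, but B may fill zero entries
-- A's recursion never visits). Objective: alternative decomposition, same cost.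

-- ===== PORT A =====
-- state-threaded transliteration of A's recursion: returns (value, mutated table)
def calcA (n : Int) (table : List Int) : Int × List Int :=
  if h2 : n ≤ 2 then (n, table)
  else if h3 : n = 3 then (4, table)
  else
    match PySem.List.pyGet? table n with
    | none => (0, table)              -- IndexError in Python; excluded by Pre_calc_py
    | some t =>
      if t = 0 then
        let r1 := calcA (n-1) table
        let r2 := calcA (n-2) r1.2
        let r3 := calcA (n-3) r2.2
        let t4 := r3.2.set n.toNat (r1.1 + r2.1 + r3.1)   -- table[n] = …  (n ≥ 4 here)
        ((PySem.List.pyGet? t4 n).getD 0, t4)             -- return table[n]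
      else (t, table)
termination_by n.toNat
decreasing_by all_goals omega

def calc_py (n : Int) (table : List Int) : Int := (calcA n table).1

-- ===== PORT B =====
-- v(j) from Source B
def bVal (table : List Int) (j : Int) : Int :=
  if j ≤ 2 then j
  else if j = 3 then 4
  else (PySem.List.pyGet? table j).getD 0    -- in range inside Pre_

-- one iteration of Source B's for-loop
def bStep (tb : List Int) (i : Int) : List Int :=
  if (PySem.List.pyGet? tb i).getD 0 = 0 then
    tb.set i.toNat (bVal tb (i-1) + bVal tb (i-2) + bVal tb (i-3))
  else tb

def calc_py_alt (n : Int) (table : List Int) : Int :=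
  if n ≤ 2 then n
  else if n = 3 then 4
  else
    match PySem.List.pyGet? table n with
    | none => 0                        -- IndexError in Python; excluded by Pre_calc_py
    | some t =>
      if t ≠ 0 then t
      else
        let final := (PySem.List.pyRange 4 (n+1) 1).foldl bStep table
        (PySem.List.pyGet? final n).getD 0

-- ===== PRECONDITION & SPEC =====
-- A raises IndexError iff n ≥ 4 and n ≥ len(table) (it only indexes the table for n ≥ 4)
def Pre_calc_py (n : Int) (table : List Int) : Prop := n ≤ 3 ∨ n < (table.length : Int)
instance (n : Int) (table : List Int) : Decidable (Pre_calc_py n table) := by unfold Pre_calc_py; infer_instance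
def pvWitness_calc_py : Int × List Int := (6, [0, 0, 0, 0, 0, 0, 0])
def Spec_calc_py (n : Int) (table : List Int) (out : Int) : Prop := out = calc_py_alt n table
instance (n : Int) (table : List Int) (out : Int) : Decidable (Spec_calc_py n table out) := by unfold Spec_calc_py; infer_instance

-- ===== CLAIM (what is proved, stated in full; the proofs are below) =====
def Claim_equal_calc_py : Prop := ∀ (n : Int) (table : List Int), Dom_calc_py n table → Pre_calc_py n table → Spec_calc_py n table (calc_py n table)

-- ===== LEMMAS AND PROOFS =====

-- the common mathematical value: fully-memoized value read off the ORIGINAL table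
def gfun (t0 : List Int) (j : Int) : Int :=
  if j ≤ 2 then j
  else if j = 3 then 4
  else
    if t0.getD j.toNat 0 = 0 then gfun t0 (j-1) + gfun t0 (j-2) + gfun t0 (j-3)
    else t0.getD j.toNat 0
termination_by j.toNat
decreasing_by all_goals omega

theorem gfun_le2 (t0 : List Int) (j : Int) (h : j ≤ 2) : gfun t0 j = j := by
  rw [gfun]; simp [h]

theorem gfun_three (t0 : List Int) : gfun t0 3 = 4 := by
  rw [gfun]; simp

theorem gfun_step (t0 : List Int) (j : Int) (h : 4 ≤ j) (hz : t0.getD j.toNat 0 = 0) :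
    gfun t0 j = gfun t0 (j-1) + gfun t0 (j-2) + gfun t0 (j-3) := by
  rw [gfun, if_neg (by omega : ¬ j ≤ 2), if_neg (by omega : ¬ j = 3), if_pos hz]

theorem gfun_hit (t0 : List Int) (j : Int) (h : 4 ≤ j) (hz : t0.getD j.toNat 0 ≠ 0) :
    gfun t0 j = t0.getD j.toNat 0 := by
  rw [gfun, if_neg (by omega : ¬ j ≤ 2), if_neg (by omega : ¬ j = 3), if_neg hz]

-- "t is t0 with some zero entries replaced by their gfun value"
def PF (t0 t : List Int) : Prop :=
  t.length = t0.length ∧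
  ∀ k : Nat, k < t0.length →
    t.getD k 0 = t0.getD k 0 ∨ (t0.getD k 0 = 0 ∧ t.getD k 0 = gfun t0 (k : Int))

theorem PF_refl (t0 : List Int) : PF t0 t0 := ⟨rfl, fun _ _ => Or.inl rfl⟩

theorem pyGet?_getD (t : List Int) (j : Int) (h0 : 0 ≤ j) (h1 : j < (t.length : Int)) :
    PySem.List.pyGet? t j = some (t.getD j.toNat 0) := by
  simp [PySem.List.pyGet?, PySem.List.pyIdx?, h0, h1]

theorem getD_set (xs : List Int) (i k : Nat) (v : Int) :
    (xs.set i v).getD k 0 = if i = k ∧ i < xs.length then v else xs.getD k 0 := by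
  simp only [List.getD_eq_getElem?_getD, List.getElem?_set]
  split_ifs with h1 h2 h3 <;> simp_all <;> omega

theorem calcA_correct (t0 : List Int) (m : Nat) :
    ∀ (j : Int) (t : List Int), j.toNat ≤ m → PF t0 t → j < (t0.length : Int) →
      (calcA j t).1 = gfun t0 j ∧ PF t0 (calcA j t).2 := by
  induction m with
  | zero =>
    intro j t hm hpf hlen
    have e : calcA j t = (j, t) := by rw [calcA]; simp [show j ≤ 2 by omega]
    rw [e, gfun_le2 t0 j (by omega)]
    exact ⟨rfl, hpf⟩
  | succ m ih =>
    intro j t hm hpf hlen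
    by_cases h2 : j ≤ 2
    · have e : calcA j t = (j, t) := by rw [calcA]; simp [h2]
      rw [e, gfun_le2 t0 j h2]
      exact ⟨rfl, hpf⟩
    · by_cases h3 : j = 3
      · subst h3
        have e : calcA 3 t = (4, t) := by rw [calcA]; norm_num
        rw [e, gfun_three]
        exact ⟨rfl, hpf⟩
      · -- j ≥ 4
        have hj4 : 4 ≤ j := by omega
        have hlent : t.length = t0.length := hpf.1
        have hget : PySem.List.pyGet? t j = some (t.getD j.toNat 0) :=
          pyGet?_getD t j (by omega) (by omega)
        have hk : j.toNat < t0.length := by omega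
        have hcast : ((j.toNat : Int)) = j := by omega
        have hpfj := hpf.2 j.toNat hk
        rw [hcast] at hpfj
        rw [calcA]
        simp only [h2, h3, if_false, hget, dite_eq_ite]
        by_cases hz : t.getD j.toNat 0 = 0
        · -- A recurses
          have ht0z : t0.getD j.toNat 0 = 0 := by
            rcases hpfj with h | ⟨h, _⟩
            · omega
            · exact h
          have h1 := ih (j-1) t (by omega) hpf (by omega)
          have h2' := ih (j-2) (calcA (j-1) t).2 (by omega) h1.2 (by omega)
          have h3' := ih (j-3) (calcA (j-2) (calcA (j-1) t).2).2 (by omega) h2'.2 (by omega)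
          simp only [hz, if_true]
          set r1 := calcA (j-1) t with hr1
          set r2 := calcA (j-2) r1.2 with hr2
          set r3 := calcA (j-3) r2.2 with hr3
          have hsum : r1.1 + r2.1 + r3.1 = gfun t0 j := by
            rw [h1.1, h2'.1, h3'.1, gfun_step t0 j hj4 ht0z]
          have hlen3 : r3.2.length = t0.length := h3'.2.1
          have hpf4 : PF t0 (r3.2.set j.toNat (r1.1 + r2.1 + r3.1)) := by
            constructor
            · simp [hlen3]
            · intro k hk'
              rw [getD_set]
              by_cases hkj : j.toNat = k
              · subst hkj
                right
                exact ⟨ht0z, by rw [if_pos ⟨rfl, by omega⟩, hsum, hcast]⟩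
              · rw [if_neg (by tauto)]
                exact h3'.2.2 k hk'
          refine ⟨?_, hpf4⟩
          have hg2 : PySem.List.pyGet? (r3.2.set j.toNat (r1.1 + r2.1 + r3.1)) j
              = some ((r3.2.set j.toNat (r1.1 + r2.1 + r3.1)).getD j.toNat 0) := by
            apply pyGet?_getD _ _ (by omega)
            simp [hlen3]; omega
          rw [hg2]
          simp only [Option.getD_some]
          rw [getD_set, if_pos ⟨rfl, by omega⟩, hsum]
        · -- cache hit
          simp only [hz, if_false]
          refine ⟨?_, hpf⟩
          rcases hpfj with h | ⟨ht0, h⟩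
          · rw [h, gfun_hit t0 j hj4 (by omega)]
          · exact h

-- B-loop invariant: after processing 4..i-1, entries 4..i-1 hold gfun, the rest are original
def BInv (t0 : List Int) (i : Int) (tb : List Int) : Prop :=
  tb.length = t0.length ∧
  ∀ k : Nat, k < t0.length →
    tb.getD k 0 = if 4 ≤ (k : Int) ∧ (k : Int) < i then gfun t0 (k : Int) else t0.getD k 0

theorem bVal_g (t0 : List Int) (b : Int) (tb : List Int) (h : BInv t0 b tb)
    (hble : b ≤ (t0.length : Int)) (j : Int) (hj : 0 ≤ j) (hjb : j < b) :
    bVal tb j = gfun t0 j := by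
  unfold bVal
  by_cases h2 : j ≤ 2
  · rw [gfun_le2 t0 j h2]; simp [h2]
  · by_cases h3 : j = 3
    · subst h3; rw [gfun_three]; simp
    · have hj4 : 4 ≤ j := by omega
      have hjlen : j < (tb.length : Int) := by have := h.1; omega
      have hk := h.2 j.toNat (by omega)
      have hcast : ((j.toNat : Int)) = j := by omega
      rw [hcast] at hk
      rw [if_neg h2, if_neg h3, pyGet?_getD tb j (by omega) hjlen]
      simp only [Option.getD_some]
      rw [hk, if_pos ⟨hj4, hjb⟩]

theorem bStep_inv (t0 : List Int) (b : Int) (tb : List Int)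
    (hb : 4 ≤ b) (hlt : b < (t0.length : Int)) (h : BInv t0 b tb) :
    BInv t0 (b+1) (bStep tb b) := by
  have hlen : tb.length = t0.length := h.1
  have hbk : b.toNat < t0.length := by omega
  have hcast : ((b.toNat : Int)) = b := by omega
  have hself := h.2 b.toNat hbk
  rw [hcast, if_neg (by omega)] at hself
  unfold bStep
  rw [pyGet?_getD tb b (by omega) (by omega)]
  simp only [Option.getD_some]
  by_cases hz : tb.getD b.toNat 0 = 0
  · rw [if_pos hz]
    have hw : bVal tb (b-1) + bVal tb (b-2) + bVal tb (b-3) = gfun t0 b := by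
      rw [bVal_g t0 b tb h (by omega) (b-1) (by omega) (by omega),
          bVal_g t0 b tb h (by omega) (b-2) (by omega) (by omega),
          bVal_g t0 b tb h (by omega) (b-3) (by omega) (by omega),
          gfun_step t0 b hb (by omega)]
    constructor
    · simp [hlen]
    · intro k hk
      rw [getD_set]
      by_cases hkb : b.toNat = k
      · subst hkb
        rw [if_pos ⟨rfl, by omega⟩, hw, hcast, if_pos ⟨by omega, by omega⟩]
      · rw [if_neg (by tauto)]
        rw [h.2 k hk]
        have : ((4 ≤ (k:Int) ∧ (k:Int) < b) ↔ (4 ≤ (k:Int) ∧ (k:Int) < b + 1)) := by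
          constructor <;> intro hx <;> (constructor; exact hx.1; omega)
        by_cases hc : 4 ≤ (k:Int) ∧ (k:Int) < b
        · rw [if_pos hc, if_pos (this.mp hc)]
        · rw [if_neg hc, if_neg (by intro hx; exact hc (this.mpr hx))]
  · rw [if_neg hz]
    constructor
    · exact hlen
    · intro k hk
      rw [h.2 k hk]
      by_cases hkb : (k:Int) = b
      · have hkn : k = b.toNat := by omega
        subst hkn
        rw [hcast, if_neg (by omega), if_pos ⟨hb, by omega⟩]
        rw [gfun_hit t0 b hb (by rw [← hself]; exact hz)]
      · by_cases hc : 4 ≤ (k:Int) ∧ (k:Int) < b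
        · rw [if_pos hc, if_pos ⟨hc.1, by omega⟩]
        · rw [if_neg hc, if_neg (by intro hx; exact hc ⟨hx.1, by omega⟩)]

theorem loop_inv (t0 : List Int) (m : Nat) (h : (4 + (m : Int)) ≤ (t0.length : Int)) :
    BInv t0 (4 + (m : Int)) ((PySem.List.pyRange 4 (4 + (m : Int)) 1).foldl bStep t0) := by
  induction m with
  | zero =>
    simp only [Nat.cast_zero, add_zero]
    rw [PySem.List.pyRange_one_eq_nil (le_refl 4)]
    simp only [List.foldl_nil]
    exact ⟨rfl, fun k hk => by rw [if_neg (by omega)]⟩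
  | succ m ih =>
    have hm : (4 + (m:Int)) ≤ t0.length := by push_cast at h ⊢; omega
    have hr : PySem.List.pyRange 4 (4 + ((m:Int)+1)) 1
        = PySem.List.pyRange 4 (4 + (m:Int)) 1 ++ [4 + (m:Int)] := by
      have := PySem.List.pyRange_one_succ_right (a := 4) (b := 4 + (m:Int)) (by omega)
      rw [show (4 + ((m:Int)+1)) = (4 + (m:Int)) + 1 by ring, this]
    have goalcast : ((m:Int)+1) = ((m+1 : Nat) : Int) := by push_cast; ring
    rw [← goalcast, hr, List.foldl_append]
    simp only [List.foldl_cons, List.foldl_nil]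
    have step := bStep_inv t0 (4 + (m:Int)) _ (by omega) (by push_cast at h; omega) (ih hm)
    rw [show (4 + (m:Int)) + 1 = 4 + ((m:Int)+1) by ring] at step
    exact step

-- ===== VERDICT (by name: the statement is the Claim_ definition above) =====
theorem calc_py_spec : Claim_equal_calc_py := by
  intro n table _ hpre
  unfold Spec_calc_py calc_py calc_py_alt
  by_cases h2 : n ≤ 2
  · rw [calcA]; simp [h2]
  · by_cases h3 : n = 3
    · rw [calcA]; simp [h2, h3]
    · have hn4 : 4 ≤ n := by omega
      have hlen : n < (table.length : Int) := by
        rcases hpre with h | h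
        · omega
        · exact h
      have hA : (calcA n table).1 = gfun table n :=
        (calcA_correct table n.toNat n table le_rfl (PF_refl table) hlen).1
      rw [hA]
      rw [pyGet?_getD table n (by omega) hlen]
      simp only [h2, h3, if_false]
      by_cases hz : table.getD n.toNat 0 = 0
      · simp only [hz, ne_eq, not_true_eq_false, if_false]
        -- loop result
        have hm : n + 1 = 4 + (((n - 3).toNat : Int)) := by omega
        have hloop := loop_inv table (n-3).toNat (by omega)
        rw [← hm] at hloop
        have hflen : ((PySem.List.pyRange 4 (n+1) 1).foldl bStep table).length = table.length :=
          hloop.1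
        rw [pyGet?_getD _ n (by omega) (by omega)]
        simp only [Option.getD_some]
        have hcast : ((n.toNat : Int)) = n := by omega
        have := hloop.2 n.toNat (by omega)
        rw [hcast, if_pos ⟨by omega, by omega⟩] at this
        rw [this]
      · simp only [hz, ne_eq, not_false_eq_true, if_true]
        rw [gfun_hit table n hn4 hz]
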